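-- pv_equiv track=rewrite | github.com/AlexMontgomerie/4NEC2_helical_gen | python/src/aux.py | reduceToDict
-- ===== SOURCE A (Python) =====
-- def reduceToDict(X):
--     #storing the mapping of the array in a dict to reduce search complexity
--     #to O(1) (instead of O(n))
--
--     xs = []
--     xPhone = {}
--     for i in X:
--         if not i in xs:
--             xs.append(i)
--     xs.sort()
--     for i, item in enumerate(xs):
--         xPhone[item] = i
--     return xs, xPhone
-- ===== SOURCE B (Python) =====
-- def reduceToDict(X):
--     # sort once, then a single fused pass: adjacent-dedup while building the
--     # value -> index dict with a running counter
--     xs = []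
--     xPhone = {}
--     prev = None
--     for v in sorted(X):
--         if prev is None or v != prev:
--             xs.append(v)
--             xPhone[v] = len(xs) - 1
--             prev = v
--     return xs, xPhone
-- ===== Notes on version B (the rewrite author's own statement) =====
-- stated objective: faster
-- what changed: replaces the quadratic scan-dedup (linear membership test per element) followed by sort and enumerate with sort-first plus one fused adjacent-dedup pass that builds the index dict as it goes
import Mathlib
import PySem

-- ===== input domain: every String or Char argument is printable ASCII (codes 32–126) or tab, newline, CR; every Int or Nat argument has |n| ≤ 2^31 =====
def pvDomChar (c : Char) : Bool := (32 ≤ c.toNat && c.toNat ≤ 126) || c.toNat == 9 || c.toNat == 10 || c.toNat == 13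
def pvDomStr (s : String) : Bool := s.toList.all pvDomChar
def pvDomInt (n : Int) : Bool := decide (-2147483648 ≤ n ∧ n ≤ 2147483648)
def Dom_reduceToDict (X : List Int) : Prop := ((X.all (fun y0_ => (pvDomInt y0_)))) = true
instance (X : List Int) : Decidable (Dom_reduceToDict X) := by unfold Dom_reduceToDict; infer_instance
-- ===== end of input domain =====

-- B sorts first and then does one fused adjacent-dedup pass that builds the index dict
-- with a running counter, instead of A's per-element membership-scan dedup + sort + enumerate.


-- ===== PORT A =====
def reduceToDict (X : List Int) : List Int × (List (Int × Int)) :=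
  let xs := X.foldl (fun xs i => if i ∈ xs then xs else xs ++ [i]) []
  let xs2 := PySem.List.sorted xs (fun x => x) false
  let xPhone := (PySem.List.enumerate xs2 0).foldl (fun d p => d.insert p.2 p.1) PySem.Dict.empty
  (xs2, xPhone.items)

-- ===== PORT B =====
def reduceToDict_alt (X : List Int) : List Int × (List (Int × Int)) :=
  let st := (PySem.List.sorted X (fun x => x) false).foldl
    (fun (st : List Int × PySem.Dict Int Int × Option Int) v =>
      if st.2.2 = none ∨ st.2.2 ≠ some v then
        (st.1 ++ [v], st.2.1.insert v (((st.1 ++ [v]).length : Int) - 1), some v)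
      else st)
    ([], PySem.Dict.empty, none)
  (st.1, st.2.1.items)

-- ===== PRECONDITION & SPEC =====
def Spec_reduceToDict (X : List Int) (out : List Int × (List (Int × Int))) : Prop := out = reduceToDict_alt X
instance (X : List Int) (out : List Int × (List (Int × Int))) : Decidable (Spec_reduceToDict X out) := by unfold Spec_reduceToDict; infer_instance

-- ===== CLAIM (what is proved, stated in full; the proofs are below) =====
def Claim_equal_reduceToDict : Prop := ∀ (X : List Int), Dom_reduceToDict X → Spec_reduceToDict X (reduceToDict X)

-- ===== LEMMAS AND PROOFS =====

/-- adjacent dedup after a previous value `p` -/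
def ddp (p : Int) : List Int → List Int
  | [] => []
  | x :: t => if x = p then ddp p t else x :: ddp x t

/-- (value, index) pairs of a list -/
def enumSwap (xs : List Int) : List (Int × Int) :=
  (PySem.List.enumerate xs 0).map (fun q => (q.2, q.1))

lemma foldA_spec (X : List Int) : ∀ (acc : List Int), acc.Nodup →
    (X.foldl (fun xs i => if i ∈ xs then xs else xs ++ [i]) acc).Nodup ∧
    (∀ a, a ∈ X.foldl (fun xs i => if i ∈ xs then xs else xs ++ [i]) acc ↔ a ∈ acc ∨ a ∈ X) := by
  induction X with
  | nil => intro acc h; simpa using h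
  | cons x t ih =>
    intro acc h
    simp only [List.foldl_cons]
    by_cases hx : x ∈ acc
    · simp only [if_pos hx]
      obtain ⟨h1, h2⟩ := ih acc h
      refine ⟨h1, fun a => ?_⟩
      rw [h2]
      constructor
      · rintro (ha | ha) <;> simp [ha]
      · rintro (ha | ha)
        · exact Or.inl ha
        · rcases List.mem_cons.mp ha with rfl | ha
          · exact Or.inl hx
          · exact Or.inr ha
    · simp only [if_neg hx]
      have hnd : (acc ++ [x]).Nodup := by
        rw [List.nodup_append]
        refine ⟨h, List.nodup_singleton x, fun a ha b hb => ?_⟩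
        simp only [List.mem_singleton] at hb
        subst hb
        exact fun h' => hx (h' ▸ ha)
      obtain ⟨h1, h2⟩ := ih (acc ++ [x]) hnd
      refine ⟨h1, fun a => ?_⟩
      rw [h2]
      simp [List.mem_append, or_assoc, or_comm, or_left_comm]

lemma ddp_spec (s : List Int) : ∀ (p : Int), s.Pairwise (· ≤ ·) → (∀ y ∈ s, p ≤ y) →
    (ddp p s).Pairwise (· < ·) ∧ (∀ y, y ∈ ddp p s ↔ y ∈ s ∧ y ≠ p) ∧ (∀ y ∈ ddp p s, p < y) := by
  induction s with
  | nil => intro p _ _; simp [ddp]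
  | cons x t ih =>
    intro p hpw hge
    have hx : ∀ y ∈ t, x ≤ y := (List.pairwise_cons.mp hpw).1
    have ht : t.Pairwise (· ≤ ·) := (List.pairwise_cons.mp hpw).2
    by_cases hxp : x = p
    · subst hxp
      have hddp : ddp x (x :: t) = ddp x t := by simp [ddp]
      rw [hddp]
      obtain ⟨h1, h2, h3⟩ := ih x ht hx
      refine ⟨h1, fun y => ?_, h3⟩
      rw [h2]
      constructor
      · rintro ⟨hy, hne⟩; exact ⟨List.mem_cons_of_mem _ hy, hne⟩
      · rintro ⟨hy, hne⟩
        rcases List.mem_cons.mp hy with rfl | hy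
        · exact absurd rfl hne
        · exact ⟨hy, hne⟩
    · have hpx : p < x := lt_of_le_of_ne (hge x (by simp)) (fun h => hxp h.symm)
      have hddp : ddp p (x :: t) = x :: ddp x t := by simp [ddp, hxp]
      rw [hddp]
      obtain ⟨h1, h2, h3⟩ := ih x ht hx
      refine ⟨?_, fun y => ?_, ?_⟩
      · exact List.pairwise_cons.mpr ⟨h3, h1⟩
      · constructor
        · intro hy
          rcases List.mem_cons.mp hy with rfl | hy
          · exact ⟨by simp, fun h => hxp h⟩
          · obtain ⟨hyt, _⟩ := (h2 y).mp hy
            exact ⟨List.mem_cons_of_mem _ hyt, by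
              have := hx y hyt
              omega⟩
        · rintro ⟨hy, hne⟩
          rcases List.mem_cons.mp hy with rfl | hy
          · exact List.mem_cons_self
          · by_cases hyx : y = x
            · subst hyx; exact List.mem_cons_self
            · exact List.mem_cons_of_mem _ ((h2 y).mpr ⟨hy, hyx⟩)
      · intro y hy
        rcases List.mem_cons.mp hy with rfl | hy
        · exact hpx
        · exact lt_trans hpx (h3 y hy)

lemma enumSwap_append_singleton (xs : List Int) (x : Int) :
    enumSwap (xs ++ [x]) = enumSwap xs ++ [(x, (xs.length : Int))] := by
  simp [enumSwap, PySem.List.enumerate_append, PySem.List.enumerate_cons, PySem.List.enumerate_nil]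

lemma map_fst_enumSwap (xs : List Int) : (enumSwap xs).map (·.1) = xs := by
  unfold enumSwap
  rw [List.map_map]
  exact PySem.List.map_snd_enumerate xs 0

lemma B_fold (s : List Int) : ∀ (xs : List Int) (d : PySem.Dict Int Int) (p : Int),
    s.Pairwise (· ≤ ·) → (∀ y ∈ s, p ≤ y) → (∀ a ∈ xs, a ≤ p) →
    d.items = enumSwap xs →
    (s.foldl (fun (st : List Int × PySem.Dict Int Int × Option Int) v =>
      if st.2.2 = none ∨ st.2.2 ≠ some v then
        (st.1 ++ [v], st.2.1.insert v (((st.1 ++ [v]).length : Int) - 1), some v)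
      else st) (xs, d, some p)).1 = xs ++ ddp p s ∧
    (s.foldl (fun (st : List Int × PySem.Dict Int Int × Option Int) v =>
      if st.2.2 = none ∨ st.2.2 ≠ some v then
        (st.1 ++ [v], st.2.1.insert v (((st.1 ++ [v]).length : Int) - 1), some v)
      else st) (xs, d, some p)).2.1.items = enumSwap (xs ++ ddp p s) := by
  induction s with
  | nil => intro xs d p _ _ _ hd; simpa [ddp] using hd
  | cons x t ih =>
    intro xs d p hpw hge hle hd
    have hx : ∀ y ∈ t, x ≤ y := (List.pairwise_cons.mp hpw).1
    have ht : t.Pairwise (· ≤ ·) := (List.pairwise_cons.mp hpw).2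
    by_cases hxp : x = p
    · subst hxp
      simp only [List.foldl_cons, if_neg (by simp : ¬((some x : Option Int) = none ∨ (some x : Option Int) ≠ some x))]
      have := ih xs d x ht hx hle hd
      simpa [ddp] using this
    · have hpx : p < x := lt_of_le_of_ne (hge x (by simp)) (fun h => hxp h.symm)
      have hcond : (some p : Option Int) = none ∨ (some p : Option Int) ≠ some x := by
        right; simp; omega
      simp only [List.foldl_cons, if_pos hcond]
      have hxfresh : d.contains x = false := by
        rw [PySem.Dict.contains_eq_decide_mem_keys]
        have hkeys : d.keys = xs := by
          simp only [PySem.Dict.keys, hd]; exact map_fst_enumSwap xs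
        simp only [hkeys, decide_eq_false_iff_not]
        intro hmem
        have := hle x hmem; omega
      have hd' : (d.insert x (((xs ++ [x]).length : Int) - 1)).items = enumSwap (xs ++ [x]) := by
        have hval : (((xs ++ [x]).length : Int) - 1) = (xs.length : Int) := by
          simp
        rw [PySem.Dict.items_insert_of_not_contains _ _ hxfresh, hd, hval,
          enumSwap_append_singleton]
      have hle' : ∀ a ∈ xs ++ [x], a ≤ x := by
        intro a ha
        rcases List.mem_append.mp ha with ha | ha
        · exact le_of_lt (lt_of_le_of_lt (hle a ha) hpx)
        · simp at ha; omega
      have := ih (xs ++ [x]) (d.insert x (((xs ++ [x]).length : Int) - 1)) x ht hx hle' hd'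
      simp only [ddp, if_neg hxp]
      constructor
      · rw [this.1]; simp
      · rw [this.2]; congr 1; simp

lemma A_items (L : List Int) (hnd : L.Nodup) :
    ((PySem.List.enumerate L 0).foldl (fun d p => d.insert p.2 p.1) PySem.Dict.empty).items
      = enumSwap L := by
  have h := PySem.Dict.items_foldl_insert_fresh (l := PySem.List.enumerate L 0)
    (k := fun p => p.2) (v := fun p => p.1) (d := PySem.Dict.empty)
    (by intro a _; exact PySem.Dict.contains_empty _)
    (by rw [PySem.List.map_snd_enumerate]; exact hnd)
  simpa [enumSwap] using h

-- ===== VERDICT (by name: the statement is the Claim_ definition above) =====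
theorem reduceToDict_spec : Claim_equal_reduceToDict := by
  intro X _
  simp only [Spec_reduceToDict, reduceToDict, reduceToDict_alt]
  -- A's dedup list
  set dA := X.foldl (fun xs i => if i ∈ xs then xs else xs ++ [i]) [] with hdA
  obtain ⟨hAnd, hAmem⟩ := foldA_spec X [] (List.nodup_nil)
  rw [← hdA] at hAnd hAmem
  have hAmem' : ∀ a, a ∈ dA ↔ a ∈ X := by intro a; rw [hAmem a]; simp
  have hspw : (PySem.List.sorted X (fun x => x) false).Pairwise (· ≤ ·) := by
    have := PySem.List.sorted_pairwise (xs := X) (key := fun x => x)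
    simpa using this
  rcases hs : PySem.List.sorted X (fun x => x) false with _ | ⟨x, t⟩
  · -- sorted X = [] : X = []
    have hX : X = [] := (PySem.List.sorted_eq_nil_iff X (fun x => x) false).mp hs
    subst hX
    simp [hdA] at hAmem' ⊢
    decide
  · rw [hs] at hspw
    have hx : ∀ y ∈ t, x ≤ y := (List.pairwise_cons.mp hspw).1
    have ht : t.Pairwise (· ≤ ·) := (List.pairwise_cons.mp hspw).2
    obtain ⟨hdpw, hdmem, hdgt⟩ := ddp_spec t x ht hx
    -- B's list
    set LB := x :: ddp x t with hLB
    have hBpw : LB.Pairwise (· < ·) := List.pairwise_cons.mpr ⟨hdgt, hdpw⟩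
    have hBnd : LB.Nodup := hBpw.imp (fun h => ne_of_lt h)
    have hBmem : ∀ y, y ∈ LB ↔ y ∈ X := by
      intro y
      have hms : y ∈ PySem.List.sorted X (fun x => x) false ↔ y ∈ X :=
        PySem.List.mem_sorted X (fun x => x) false y
      rw [hs] at hms
      rw [hLB, List.mem_cons, hdmem y, ← hms, List.mem_cons]
      constructor
      · rintro (rfl | ⟨hy, _⟩)
        · exact Or.inl rfl
        · exact Or.inr hy
      · rintro (rfl | hy)
        · exact Or.inl rfl
        · by_cases hyx : y = x
          · exact Or.inl hyx
          · exact Or.inr ⟨hy, hyx⟩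
    -- A's sorted list equals LB
    have hperm : LB.Perm dA := by
      rw [List.perm_ext_iff_of_nodup hBnd hAnd]
      intro a; rw [hBmem a, hAmem' a]
    have hLA : PySem.List.sorted dA (fun x => x) false = LB := by
      apply PySem.List.sorted_eq_of_perm_of_pairwise_lt _ _ _ hperm
      simpa using hBpw
    -- B's fold
    have hd1 : ((PySem.Dict.empty : PySem.Dict Int Int).insert x ((([x] : List Int).length : Int) - 1)).items = enumSwap [x] := by
      rw [PySem.Dict.items_insert_of_not_contains _ _ (PySem.Dict.contains_empty _)]
      norm_num [enumSwap, PySem.List.enumerate_cons, PySem.List.enumerate_nil,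
        PySem.Dict.empty]
    have hBf := B_fold t [x]
      ((PySem.Dict.empty : PySem.Dict Int Int).insert x ((([x] : List Int).length : Int) - 1)) x
      ht hx (by intro a ha; simp at ha; omega) hd1
    simp only [hLA, List.foldl_cons, List.nil_append]
    rw [if_pos (Or.inl trivial : True ∨ (none : Option Int) ≠ some x)]
    rw [hBf.1, hBf.2, A_items LB hBnd]
    have hcat : [x] ++ ddp x t = LB := by simp [hLB]
    rw [hcat]
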